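-- pv_equiv track=rewrite | github.com/Treytucker05/pt-study-sop | brain/selector.py | _enforce_reference_dependency
-- ===== SOURCE A (Python) =====
-- _REFERENCE_TARGET_METHODS = {"M-REF-003", "M-REF-004"}
--
-- def _enforce_reference_dependency(block_method_ids: list[str]) -> tuple[list[str], bool]:
--     first_retrieve_idx = next(
--         (idx for idx, method_id in enumerate(block_method_ids) if method_id.startswith("M-RET-")),
--         None,
--     )
--     if first_retrieve_idx is None:
--         return list(block_method_ids), False
--
--     first_reference_idx = next(
--         (idx for idx, method_id in enumerate(block_method_ids) if method_id in _REFERENCE_TARGET_METHODS),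
--         None,
--     )
--     if first_reference_idx is not None and first_reference_idx < first_retrieve_idx:
--         return list(block_method_ids), False
--
--     stripped = [method_id for method_id in block_method_ids if method_id not in _REFERENCE_TARGET_METHODS]
--     insert_at = next(
--         (idx for idx, method_id in enumerate(stripped) if method_id.startswith("M-RET-")),
--         len(stripped),
--     )
--     fixed = stripped[:insert_at] + sorted(_REFERENCE_TARGET_METHODS) + stripped[insert_at:]
--     return fixed, True
-- ===== SOURCE B (Python) =====
-- def _enforce_reference_dependency(block_method_ids: list[str]) -> tuple[list[str], bool]:
--     # Single early-exit walk: the first reference-or-retrieve element decides the outcome.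
--     # A reference element first (or no retrieve at all) -> unchanged; a retrieve element
--     # first -> emit the kept head, both reference ids, then the rest with references dropped.
--     head = []
--     for i, m in enumerate(block_method_ids):
--         if m in ("M-REF-003", "M-REF-004"):
--             return list(block_method_ids), False
--         if m.startswith("M-RET-"):
--             tail = [x for x in block_method_ids[i:] if x not in ("M-REF-003", "M-REF-004")]
--             return head + ["M-REF-003", "M-REF-004"] + tail, True
--         head.append(m)
--     return list(block_method_ids), False
-- ===== Notes on version B (the rewrite author's own statement) =====
-- stated objective: alternative
-- what changed: Replaces A's three precomputed index scans plus filter/slice/concat splice by a single early-exit walk: the first reference-or-retrieve element encountered decides the outcome on the spot (reference first or none relevant: return the copy unchanged; retrieve first: emit accumulated head, both reference ids, then the remaining suffix with references dropped).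
import Mathlib
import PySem

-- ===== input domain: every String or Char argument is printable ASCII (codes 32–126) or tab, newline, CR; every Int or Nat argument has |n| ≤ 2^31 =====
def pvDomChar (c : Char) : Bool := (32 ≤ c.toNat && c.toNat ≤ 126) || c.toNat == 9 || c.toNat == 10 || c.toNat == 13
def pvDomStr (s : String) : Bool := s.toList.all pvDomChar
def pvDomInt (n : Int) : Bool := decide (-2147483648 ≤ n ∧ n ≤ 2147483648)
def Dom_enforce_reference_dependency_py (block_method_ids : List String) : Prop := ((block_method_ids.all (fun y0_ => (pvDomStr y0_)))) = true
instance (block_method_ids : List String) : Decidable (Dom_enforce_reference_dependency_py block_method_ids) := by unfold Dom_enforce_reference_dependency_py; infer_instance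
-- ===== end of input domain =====

-- B replaces A's three index scans + filter/slice splice by a single early-exit walk in which
-- the first reference-or-retrieve element decides the outcome (alternative decomposition, same O(n)).
-- ===== PORT A =====
def pvIsRef (m : String) : Bool := m == "M-REF-003" || m == "M-REF-004"

def pvIsRet (m : String) : Bool := PySem.Str.startswith m "M-RET-"

-- next((idx for idx, x in enumerate(xs) if p x), None), index based at i
def pvFindIdx (p : String → Bool) : List String → Int → Option Int
  | [], _ => none
  | x :: xs, i => if p x then some i else pvFindIdx p xs (i + 1)

-- the 'stripped / insert_at / fixed' tail of A
def pvFixed (bs : List String) : List String × Bool :=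
  let stripped := bs.filter (fun m => !pvIsRef m)
  let insert_at := (pvFindIdx pvIsRet stripped 0).getD (stripped.length : Int)
  (PySem.List.slice stripped none (some insert_at)
     ++ ["M-REF-003", "M-REF-004"]
     ++ PySem.List.slice stripped (some insert_at) none, true)

def enforce_reference_dependency_py (block_method_ids : List String) : List String × Bool :=
  match pvFindIdx pvIsRet block_method_ids 0 with
  | none => (block_method_ids, false)
  | some first_retrieve_idx =>
    match pvFindIdx pvIsRef block_method_ids 0 with
    | some first_reference_idx =>
        if first_reference_idx < first_retrieve_idx then (block_method_ids, false)
        else pvFixed block_method_ids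
    | none => pvFixed block_method_ids

-- ===== PORT B =====
def pvBRef (m : String) : Bool := ["M-REF-003", "M-REF-004"].contains m

-- B's for-loop: 'rest' is block_method_ids[i:], 'head' the accumulated kept prefix;
-- the first reference-or-retrieve element met triggers an early return.
def pvWalk (orig : List String) : List String → List String → List String × Bool
  | [], _ => (orig, false)
  | m :: rest, head =>
      if pvBRef m then (orig, false)
      else if PySem.Str.startswith m "M-RET-" then
        (head ++ ["M-REF-003", "M-REF-004"] ++ (m :: rest).filter (fun x => !pvBRef x), true)
      else pvWalk orig rest (head ++ [m])

def enforce_reference_dependency_py_alt (block_method_ids : List String) : List String × Bool :=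
  pvWalk block_method_ids block_method_ids []

-- ===== PRECONDITION & SPEC =====
def Spec_enforce_reference_dependency_py (block_method_ids : List String) (out : List String × Bool) : Prop := out = enforce_reference_dependency_py_alt block_method_ids
instance (block_method_ids : List String) (out : List String × Bool) : Decidable (Spec_enforce_reference_dependency_py block_method_ids out) := by unfold Spec_enforce_reference_dependency_py; infer_instance

-- ===== CLAIM (what is proved, stated in full; the proofs are below) =====
def Claim_equal_enforce_reference_dependency_py : Prop := ∀ (block_method_ids : List String), Dom_enforce_reference_dependency_py block_method_ids → Spec_enforce_reference_dependency_py block_method_ids (enforce_reference_dependency_py block_method_ids)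

-- ===== LEMMAS AND PROOFS =====

theorem pvRef_eq (m : String) : pvBRef m = pvIsRef m := by
  rw [Bool.eq_iff_iff]
  simp [pvBRef, pvIsRef, List.contains_eq_mem]

theorem pvRef_not_ret (m : String) (h : pvIsRef m = true) : pvIsRet m = false := by
  simp [pvIsRef] at h
  rcases h with h | h <;> subst h <;> decide

theorem pvFindIdx_shift (p : String → Bool) (bs : List String) : ∀ i : Int,
    pvFindIdx p bs i = (bs.findIdx? p).map (fun n => i + (n : Int)) := by
  induction bs with
  | nil => intro i; simp [pvFindIdx]
  | cons m ms ih =>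
      intro i
      by_cases h : p m
      · simp [pvFindIdx, h, List.findIdx?_cons]
      · rw [pvFindIdx, if_neg h, ih (i + 1), List.findIdx?_cons, if_neg h]
        cases List.findIdx? p ms with
        | none => simp
        | some n => simp; ring

theorem pvInsertAt_eq (p : String → Bool) (s : List String) :
    (pvFindIdx p s 0).getD (s.length : Int) = ((s.findIdx p : Nat) : Int) := by
  rw [pvFindIdx_shift]
  cases hf : s.findIdx? p with
  | none => simp [List.findIdx?_eq_none_iff_findIdx_eq.mp hf]
  | some n => simp [(List.findIdx?_eq_some_iff_findIdx_eq.mp hf).2]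

-- the fixed output in take/drop form, with the kept prefix 'acc' already emitted
def pvFixOut (acc bs : List String) (n : Nat) : List String × Bool :=
  (acc ++ bs.take n ++ ["M-REF-003", "M-REF-004"]
     ++ (bs.drop n).filter (fun m => !pvIsRef m), true)

-- characterization of B's walk by the first retrieve / first reference indices
theorem pvWalk_char (bs : List String) : ∀ (acc orig : List String),
    pvWalk orig bs acc =
      match bs.findIdx? pvIsRet with
      | none => (orig, false)
      | some n =>
        match bs.findIdx? pvIsRef with
        | some f => if f < n then (orig, false) else pvFixOut acc bs n
        | none => pvFixOut acc bs n := by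
  induction bs with
  | nil => intro acc orig; simp [pvWalk]
  | cons m ms ih =>
      intro acc orig
      by_cases hf : pvIsRef m
      · have hr : pvIsRet m = false := pvRef_not_ret m hf
        rw [pvWalk, if_pos (show pvBRef m = true by rw [pvRef_eq]; exact hf)]
        rw [List.findIdx?_cons, if_neg (by simp [hr]), List.findIdx?_cons, if_pos hf]
        cases List.findIdx? pvIsRet ms with
        | none => simp
        | some n => simp
      · by_cases hr : pvIsRet m
        · rw [pvWalk, if_neg (show ¬pvBRef m = true by rw [pvRef_eq]; exact hf), if_pos (show PySem.Str.startswith m "M-RET-" = true from hr)]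
          rw [List.findIdx?_cons, if_pos hr, List.findIdx?_cons, if_neg hf]
          have hfix : pvFixOut acc (m :: ms) 0
              = (acc ++ ["M-REF-003", "M-REF-004"]
                   ++ (m :: ms).filter (fun x => !pvIsRef x), true) := by
            simp [pvFixOut]
          cases List.findIdx? pvIsRef ms with
          | none => simp [hfix, funext pvRef_eq]
          | some f => simp [hfix, funext pvRef_eq]
        · rw [pvWalk, if_neg (show ¬pvBRef m = true by rw [pvRef_eq]; exact hf), if_neg (show ¬PySem.Str.startswith m "M-RET-" = true from hr), ih (acc ++ [m]) orig]
          rw [List.findIdx?_cons, if_neg hr, List.findIdx?_cons, if_neg hf]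
          cases List.findIdx? pvIsRet ms with
          | none => simp
          | some n =>
              cases List.findIdx? pvIsRef ms with
              | none => simp [pvFixOut]
              | some f =>
                  simp only [Option.map_some]
                  by_cases hlt : f < n
                  · rw [if_pos hlt, if_pos (by omega)]
                  · rw [if_neg hlt, if_neg (by omega)]
                    simp [pvFixOut]

-- A's fixed branch in take/drop form
theorem pvFixed_takedrop (bs : List String) :
    pvFixed bs
      = ((bs.filter (fun m => !pvIsRef m)).take ((bs.filter (fun m => !pvIsRef m)).findIdx pvIsRet)
          ++ ["M-REF-003", "M-REF-004"]
          ++ (bs.filter (fun m => !pvIsRef m)).drop ((bs.filter (fun m => !pvIsRef m)).findIdx pvIsRet), true) := by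
  dsimp only [pvFixed]
  rw [pvInsertAt_eq, PySem.List.slice_to_natCast, PySem.List.slice_from_natCast]

-- A's strip-and-splice equals the take/drop form when no reference precedes the first retrieve
theorem pvFixed_char (bs : List String) : ∀ (n : Nat),
    bs.findIdx? pvIsRet = some n →
    (∀ f, bs.findIdx? pvIsRef = some f → ¬ f < n) →
    pvFixed bs = pvFixOut [] bs n := by
  induction bs with
  | nil => intro n h; simp at h
  | cons m ms ih =>
      intro n hn hno
      rw [pvFixed_takedrop]
      by_cases hr : pvIsRet m
      · have hf : pvIsRef m = false := by
          by_contra h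
          exact absurd hr (by simp [pvRef_not_ret m (by simpa using h)])
        rw [List.findIdx?_cons, if_pos hr] at hn
        injection hn with hn0; subst hn0
        simp [pvFixOut, hf, List.findIdx_cons, hr]
      · rw [List.findIdx?_cons, if_neg hr] at hn
        cases hms : List.findIdx? pvIsRet ms with
        | none => rw [hms] at hn; simp at hn
        | some n' =>
            rw [hms] at hn
            simp only [Option.map_some, Option.some.injEq] at hn
            subst hn
            have hf : pvIsRef m = false := by
              by_contra h
              have h' : pvIsRef m = true := by simpa using h
              have : List.findIdx? pvIsRef (m :: ms) = some 0 := by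
                rw [List.findIdx?_cons, if_pos h']
              exact (hno 0 this) (by omega)
            have hno' : ∀ f, ms.findIdx? pvIsRef = some f → ¬ f < n' := by
              intro f hfms
              have : List.findIdx? pvIsRef (m :: ms) = some (f + 1) := by
                rw [List.findIdx?_cons, if_neg (by simp [hf]), hfms]; rfl
              have := hno (f + 1) this
              omega
            have hih := ih n' hms hno'
            rw [pvFixed_takedrop] at hih
            have h1 := congrArg Prod.fst hih
            simp only [pvFixOut] at h1 ⊢
            simp only [List.filter_cons, hf, Bool.not_false, if_pos, List.findIdx_cons, hr,
              cond_false, List.take_succ_cons, List.drop_succ_cons, List.nil_append,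
              List.cons_append] at *
            rw [Prod.mk.injEq]
            exact ⟨by rw [h1], rfl⟩

-- ===== VERDICT (by name: the statement is the Claim_ definition above) =====
theorem enforce_reference_dependency_py_spec : Claim_equal_enforce_reference_dependency_py := by
  intro bs _
  unfold Spec_enforce_reference_dependency_py
  unfold enforce_reference_dependency_py enforce_reference_dependency_py_alt
  rw [pvWalk_char]
  rw [pvFindIdx_shift pvIsRet bs 0, pvFindIdx_shift pvIsRef bs 0]
  cases hn : bs.findIdx? pvIsRet with
  | none => simp
  | some n =>
      cases hf : bs.findIdx? pvIsRef with
      | none =>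
          exact pvFixed_char bs n hn (by intro f h; rw [hf] at h; exact absurd h (by simp))
      | some f =>
          by_cases hlt : f < n
          · simp [hlt]
          · simp only [Option.map_some, Option.bind_some, Option.pure_def, Option.bind_eq_bind]
            rw [if_neg (show ¬ ((0:Int) + (f:Int) < 0 + (n:Int)) by omega), if_neg hlt]
            exact pvFixed_char bs n hn (by intro f' h; rw [hf] at h; injection h with h; omega)
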